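-- pv_equiv track=rewrite | github.com/miliar/Code_Jam_Webscraper | Solutions_python/Problem_180/1172.py | grow_pattern
-- ===== SOURCE A (Python) =====
-- import itertools
--
-- def grow_pattern(K, C):
-- 	fractals = []
-- 	patterns = itertools.product("GL", repeat=K)
-- 	for pattern in patterns:
-- 		fractal = ''.join(pattern)
-- 		for i in range(C):
-- 			new_fractal = []
-- 			for c in fractal:
-- 				if c == "L":
-- 					new_fractal.append(''.join(pattern))
-- 				elif c == "G":
-- 					new_fractal.append("G"*len(pattern))
-- 			fractal = ''.join(new_fractal)
-- 		fractals.append(fractal)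
-- 	return fractals
-- ===== SOURCE B (Python) =====
-- import itertools
--
-- def grow_pattern(K, C):
--     depth = C if C > 0 else 0
--     results = []
--     for pattern in itertools.product("GL", repeat=K):
--         p = ''.join(pattern)
--         # g, l = the depth-d expansions of the single symbols 'G' and 'L'
--         g, l = 'G', 'L'
--         for d in range(1, depth + 1):
--             g, l = 'G' * (K ** d), ''.join(g if c == 'G' else l for c in p)
--         results.append(''.join(g if c == 'G' else l for c in p))
--     return results
-- ===== Notes on version B (the rewrite author's own statement) =====
-- stated objective: alternative
-- what changed: Replaces A's C-fold rewriting of the whole growing fractal string with a two-string dynamic program that maintains only the depth-d expansions of the symbols 'G' and 'L' (G in closed form as 'G'*K**d) and assembles the fractal from the pattern once at the end.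
import Mathlib
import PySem

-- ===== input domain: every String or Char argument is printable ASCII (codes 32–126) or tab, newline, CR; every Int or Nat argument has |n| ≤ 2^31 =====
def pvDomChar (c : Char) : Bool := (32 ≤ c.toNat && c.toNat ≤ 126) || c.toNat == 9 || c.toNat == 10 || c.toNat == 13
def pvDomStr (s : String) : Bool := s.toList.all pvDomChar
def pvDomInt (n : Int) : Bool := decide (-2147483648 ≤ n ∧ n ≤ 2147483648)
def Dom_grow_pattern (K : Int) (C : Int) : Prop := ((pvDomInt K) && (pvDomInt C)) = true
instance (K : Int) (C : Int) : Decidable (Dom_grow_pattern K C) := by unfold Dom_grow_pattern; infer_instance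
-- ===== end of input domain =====

-- B replaces A's C-fold whole-string rewriting loop by a recursive per-character
-- expansion of the fractal tree (objective: alternative decomposition).


-- shared helper: itertools.product("GL", repeat=K) (both Pythons call it);
-- first position varies slowest, exactly itertools' order
def pyProductGL : Nat → List (List Char)
  | 0 => [[]]
  | n+1 => (pyProductGL n).map (fun t => 'G' :: t) ++ (pyProductGL n).map (fun t => 'L' :: t)

-- ===== PORT A =====
-- one pass of A's inner rewriting loop: new_fractal accumulated left to right
def growStep (pattern : List Char) (fractal : List Char) : List Char :=
  fractal.foldl (fun acc c =>
    if c = 'L' then acc ++ pattern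
    else if c = 'G' then acc ++ List.replicate pattern.length 'G'
    else acc) []

-- 'for i in range(C)' (empty for C ≤ 0, hence the Int.toNat at the call site)
def growLoop (pattern : List Char) : Nat → List Char → List Char
  | 0, fractal => fractal
  | n+1, fractal => growLoop pattern n (growStep pattern fractal)

-- K < 0 makes itertools.product raise ValueError; excluded by Pre_grow_pattern
def grow_pattern (K : Int) (C : Int) : List String :=
  if K < 0 then []
  else (pyProductGL K.toNat).foldl
    (fun fractals pattern => fractals ++ [String.mk (growLoop pattern C.toNat pattern)]) []

-- ===== PORT B =====
-- Source B's inner loop "for d in range(1, depth+1)": gl = the depth-d expansions of the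
-- single symbols 'G' and 'L'; tail-recursive with d counting up and r steps remaining
def expandFrom (K : Nat) (p : List Char) : Nat → Nat → (List Char × List Char) → (List Char × List Char)
  | _, 0, gl => gl
  | d, r+1, gl =>
    expandFrom K p (d+1) r
      (List.replicate (K ^ d) 'G',
       (p.map (fun c => if c = 'G' then gl.1 else gl.2)).flatten)

def expandLoop (K : Nat) (p : List Char) (depth : Nat) : List Char × List Char :=
  expandFrom K p 1 depth (['G'], ['L'])

-- K < 0 makes itertools.product raise ValueError; depth = C if C > 0 else 0 is C.toNat
def grow_pattern_alt (K : Int) (C : Int) : List String :=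
  if K < 0 then []
  else (pyProductGL K.toNat).map (fun p =>
    let gl := expandLoop K.toNat p C.toNat
    String.mk ((p.map (fun c => if c = 'G' then gl.1 else gl.2)).flatten))

-- ===== PRECONDITION & SPEC =====
-- Pre_ excludes exactly K < 0, where the Python A raises ValueError (itertools.product)
def Pre_grow_pattern (K : Int) (C : Int) : Prop := 0 ≤ K
instance (K : Int) (C : Int) : Decidable (Pre_grow_pattern K C) := by unfold Pre_grow_pattern; infer_instance
def pvWitness_grow_pattern : Int × Int := (2, 2)

def Spec_grow_pattern (K : Int) (C : Int) (out : List String) : Prop := out = grow_pattern_alt K C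
instance (K : Int) (C : Int) (out : List String) : Decidable (Spec_grow_pattern K C out) := by unfold Spec_grow_pattern; infer_instance

-- ===== CLAIM (what is proved, stated in full; the proofs are below) =====
def Claim_equal_grow_pattern : Prop := ∀ (K : Int) (C : Int), Dom_grow_pattern K C → Pre_grow_pattern K C → Spec_grow_pattern K C (grow_pattern K C)

-- ===== LEMMAS AND PROOFS =====

-- proof-side bridge: the per-character recursive expansion both algorithms compute
def expandB (K : Nat) (pattern : List Char) : Char → Nat → List Char
  | ch, 0 => [ch]
  | ch, d+1 =>
    if ch = 'G' then List.replicate (K ^ (d+1)) 'G'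
    else (pattern.map (fun c => expandB K pattern c d)).flatten


-- the substitution A's inner pass performs on each character
def substGL (pattern : List Char) (c : Char) : List Char :=
  if c = 'L' then pattern
  else if c = 'G' then List.replicate pattern.length 'G'
  else []

theorem growStep_eq_flatMap (p s : List Char) :
    growStep p s = s.flatMap (substGL p) := by
  unfold growStep
  suffices h : ∀ acc : List Char, s.foldl (fun acc c =>
      if c = 'L' then acc ++ p
      else if c = 'G' then acc ++ List.replicate p.length 'G'
      else acc) acc = acc ++ s.flatMap (substGL p) by
    simpa using h []
  induction s with
  | nil => intro acc; simp
  | cons c t ih =>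
    intro acc
    simp only [List.foldl_cons, List.flatMap_cons, ih, substGL]
    split_ifs <;> simp

theorem mem_pyProductGL {n : Nat} {p : List Char} (h : p ∈ pyProductGL n) :
    p.length = n ∧ ∀ c ∈ p, c = 'G' ∨ c = 'L' := by
  induction n generalizing p with
  | zero => simp [pyProductGL] at h; simp [h]
  | succ m ih =>
    simp only [pyProductGL, List.mem_append, List.mem_map] at h
    rcases h with ⟨t, ht, rfl⟩ | ⟨t, ht, rfl⟩ <;>
      · obtain ⟨hlen, hGL⟩ := ih ht
        refine ⟨by simp [hlen], ?_⟩
        intro c hc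
        rcases List.mem_cons.mp hc with rfl | hc
        · simp
        · exact hGL c hc

theorem expandB_G (K : Nat) (p : List Char) (d : Nat) :
    expandB K p 'G' d = List.replicate (K ^ d) 'G' := by
  cases d with
  | zero => simp [expandB]
  | succ m => simp [expandB]

theorem flatMap_replicate_G (n m : Nat) :
    (List.replicate n 'G').flatMap (fun _ => List.replicate m 'G') =
      List.replicate (n * m) 'G' := by
  induction n with
  | zero => simp
  | succ k ih => rw [List.replicate_succ, List.flatMap_cons, ih, Nat.succ_mul, Nat.add_comm,
        List.replicate_add]

-- chars of one rewriting pass stay in {G, L}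
theorem growStep_chars (p s : List Char) (hp : ∀ c ∈ p, c = 'G' ∨ c = 'L') :
    ∀ c ∈ growStep p s, c = 'G' ∨ c = 'L' := by
  intro c hc
  rw [growStep_eq_flatMap] at hc
  obtain ⟨c', _, hc⟩ := List.mem_flatMap.mp hc
  unfold substGL at hc
  split_ifs at hc
  · exact hp c hc
  · left; exact List.eq_of_mem_replicate hc
  · simp at hc

-- the central invariant: C passes of A's rewriting = per-character recursive expansion
theorem growLoop_eq_expand (K : Nat) (p : List Char)
    (hp : ∀ c ∈ p, c = 'G' ∨ c = 'L') (hlen : p.length = K) :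
    ∀ (d : Nat) (s : List Char), (∀ c ∈ s, c = 'G' ∨ c = 'L') →
      growLoop p d s = s.flatMap (fun c => expandB K p c d) := by
  intro d
  induction d with
  | zero =>
    intro s _hs
    simp [growLoop, expandB]
  | succ m ih =>
    intro s hs
    show growLoop p m (growStep p s) = _
    rw [ih (growStep p s) (growStep_chars p s hp),
        growStep_eq_flatMap, List.flatMap_assoc]
    apply List.flatMap_congr
    intro c hc
    rcases hs c hc with rfl | rfl
    · simp only [substGL, reduceIte]
      rw [hlen]
      calc (List.replicate K 'G').flatMap (fun c' => expandB K p c' m)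
          = (List.replicate K 'G').flatMap (fun _ => List.replicate (K ^ m) 'G') := by
            apply List.flatMap_congr
            intro x hx
            rw [List.eq_of_mem_replicate hx, expandB_G]
        _ = List.replicate (K ^ (m + 1)) 'G' := by
            rw [flatMap_replicate_G, pow_succ, Nat.mul_comm]
        _ = expandB K p 'G' (m + 1) := by rw [expandB_G]
    · simp [substGL, expandB, List.flatMap]

-- one python loop iteration advances the (g, l) pair by one expansion depth
theorem pair_step (K : Nat) (p : List Char)
    (hp : ∀ c ∈ p, c = 'G' ∨ c = 'L') (d : Nat) :
    (List.replicate (K ^ (d+1)) 'G',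
      (p.map (fun c => if c = 'G' then expandB K p 'G' d else expandB K p 'L' d)).flatten)
      = (expandB K p 'G' (d+1), expandB K p 'L' (d+1)) := by
  simp only [expandB, reduceIte, Char.reduceEq, Prod.mk.injEq, true_and]
  congr 1
  apply List.map_congr_left
  intro c hc
  rcases hp c hc with rfl | rfl <;> simp

theorem expandFrom_eq_expandB (K : Nat) (p : List Char)
    (hp : ∀ c ∈ p, c = 'G' ∨ c = 'L') :
    ∀ (r d : Nat),
      expandFrom K p (d+1) r (expandB K p 'G' d, expandB K p 'L' d)
        = (expandB K p 'G' (d+r), expandB K p 'L' (d+r)) := by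
  intro r
  induction r with
  | zero => intro d; simp [expandFrom]
  | succ m ih =>
    intro d
    show expandFrom K p (d+2) m _ = _
    rw [show (List.replicate (K ^ (d+1)) 'G',
        (p.map (fun c => if c = 'G' then (expandB K p 'G' d, expandB K p 'L' d).1
          else (expandB K p 'G' d, expandB K p 'L' d).2)).flatten)
        = (expandB K p 'G' (d+1), expandB K p 'L' (d+1)) from pair_step K p hp d,
      ih (d+1)]
    congr 2 <;> omega

theorem expandLoop_eq_expandB (K : Nat) (p : List Char)
    (hp : ∀ c ∈ p, c = 'G' ∨ c = 'L') (depth : Nat) :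
    expandLoop K p depth = (expandB K p 'G' depth, expandB K p 'L' depth) := by
  have h := expandFrom_eq_expandB K p hp depth 0
  simpa [expandLoop, expandB] using h

theorem foldl_append_singleton {α β : Type} (f : α → β) (l : List α) (init : List β) :
    l.foldl (fun acc x => acc ++ [f x]) init = init ++ l.map f := by
  induction l generalizing init with
  | nil => simp
  | cons x t ih => simp [ih]

-- ===== VERDICT (by name: the statement is the Claim_ definition above) =====
theorem grow_pattern_spec : Claim_equal_grow_pattern := by
  intro K C _ hPre
  unfold Spec_grow_pattern grow_pattern grow_pattern_alt
  have hK : ¬ K < 0 := not_lt.mpr hPre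
  simp only [hK, if_false, foldl_append_singleton, List.nil_append]
  apply List.map_congr_left
  intro p hp
  obtain ⟨hlen, hGL⟩ := mem_pyProductGL hp
  rw [growLoop_eq_expand K.toNat p hGL hlen C.toNat p hGL,
      expandLoop_eq_expandB K.toNat p hGL C.toNat, List.flatMap]
  congr 1
  congr 1
  apply List.map_congr_left
  intro c hc
  rcases hGL c hc with rfl | rfl <;> simp
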